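-- pv_equiv track=rewrite | github.com/teagh82/coding_study | coding_study_python/greedy_조이스틱.py | solution
-- ===== SOURCE A (Python) =====
-- def solution(name):
--     answer = 0
--     min_move = []
--
--     # 상하, 좌우로 최솟값 고려
--     # 상하 최솟값 - 위로 이동 vs Z로, 아래로 이동
--     for i, ch in enumerate(name):
--         tmp = min(ord(ch) - ord('A'), ord('Z') - ord(ch) + 1)
--         min_move.append(tmp)
--
--     i = 0
--     while True:
--         answer += min_move[i]
--         min_move[i] = 0
--
--         # A일 경우 넘어감
--         if sum(min_move) == 0:
--             break
--
--         # 좌우 최솟값 - 오른쪽으로만 이동 vs 왼쪽으로 돌아가 이동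
--         # A가 등장할 경우 반대쪽으로 이동할 경우 있음 (다시 처음으로 돌아간 후 뒤에서 마지막 A까지 이동)
--         left,right = 1,1
--         while min_move[i - left] == 0:
--             left += 1
--         while min_move[i + right] == 0:
--             right += 1
--
--         answer += left if left < right else right
--         i += -left if left < right else right
--
--     return answer
-- ===== SOURCE B (Python) =====
-- def solution(name):
--     # One pass to build the vertical costs, then simulate the same greedy on a
--     # sorted list of still-nonzero indices with a gap pointer: no rescanning of
--     # the whole array and no per-step sum() recomputation.
--     n = len(name)
--     moves = [min(ord(c) - ord('A'), ord('Z') - ord(c) + 1) for c in name]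
--     answer = moves[0]
--     remaining = sum(moves) - moves[0]
--     live = [j for j in range(1, n) if moves[j] != 0]  # sorted pending indices
--     p, k = 0, 0  # cursor position; k = rank of p in live (gap index)
--     while remaining != 0:
--         l = live[k - 1]                            # nearest pending on the left (cyclic)
--         r = live[k] if k < len(live) else live[0]  # nearest pending on the right (cyclic)
--         dl = (p - l) % n
--         dr = (r - p) % n
--         if dl < dr:
--             k = (k - 1) % len(live)
--             p = live.pop(k)
--             answer += dl + moves[p]
--         else:
--             if k == len(live):
--                 k = 0
--             p = live.pop(k)
--             answer += dr + moves[p]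
--         remaining -= moves[p]
--     return answer
-- ===== Notes on version B (the rewrite author's own statement) =====
-- stated objective: faster
-- what changed: B replaces A's per-iteration sum(min_move) recomputation and linear left/right rescans with a sorted list of still-nonzero indices plus a gap pointer (nearest pending neighbours read directly, removed on visit) and an incrementally maintained remaining total.
import Mathlib
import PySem

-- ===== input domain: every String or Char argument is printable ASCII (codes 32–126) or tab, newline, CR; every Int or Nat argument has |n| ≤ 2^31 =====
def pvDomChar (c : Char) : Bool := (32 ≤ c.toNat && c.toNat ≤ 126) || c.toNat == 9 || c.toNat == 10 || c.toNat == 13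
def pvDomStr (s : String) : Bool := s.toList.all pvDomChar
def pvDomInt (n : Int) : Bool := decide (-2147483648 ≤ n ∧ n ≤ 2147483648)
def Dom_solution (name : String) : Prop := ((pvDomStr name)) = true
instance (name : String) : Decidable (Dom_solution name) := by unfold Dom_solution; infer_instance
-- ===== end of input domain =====

-- B replaces A's per-step full-array rescans and sum() recomputation by one sorted list of
-- pending indices with a gap pointer, maintaining the remaining total incrementally.


-- ===== PORT A =====
-- while min_move[i - left] == 0: left += 1   (none = Python IndexError; fuel is a bound, never reached before the answer)
def solScanL (mm : List Int) (i : Int) : Nat → Int → Option Int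
  | 0, _ => none
  | fuel+1, l =>
    match PySem.List.pyGet? mm (i - l) with
    | none => none
    | some v => if v = 0 then solScanL mm i fuel (l + 1) else some l

-- while min_move[i + right] == 0: right += 1
def solScanR (mm : List Int) (i : Int) : Nat → Int → Option Int
  | 0, _ => none
  | fuel+1, r =>
    match PySem.List.pyGet? mm (i + r) with
    | none => none
    | some v => if v = 0 then solScanR mm i fuel (r + 1) else some r

-- the 'while True' loop of A; fuel n+1 bounds the iterations (each zeroes one nonzero entry);
-- the 'none'/fuel-0 fallbacks are Python exceptions, unreachable on Pre_
def solLoop (mm : List Int) (i ans : Int) : Nat → Int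
  | 0 => ans
  | fuel+1 =>
    let v := (PySem.List.pyGet? mm i).getD 0
    let ans := ans + v
    let mm := PySem.List.pySetD mm i 0
    if mm.sum = 0 then ans
    else
      match solScanL mm i (2 * mm.length + 2) 1, solScanR mm i (2 * mm.length + 2) 1 with
      | some l, some r =>
          if l < r then solLoop mm (i - l) (ans + l) fuel
          else solLoop mm (i + r) (ans + r) fuel
      | _, _ => ans

def solution (name : String) : Int :=
  let mm := name.toList.map (fun ch => min ((ch.toNat : Int) - 65) (90 - (ch.toNat : Int) + 1))
  solLoop mm 0 0 (mm.length + 1)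

-- ===== PORT B =====
-- the 'while remaining != 0' loop of Source B; fuel bounds the iterations (one pending index is
-- removed per step); the 'none'/fuel-0 fallbacks are unreachable on Pre_
def altLoop (n : Int) (moves : List Int) : Nat → Int → Int → List Int → Int → Int → Int
  | 0, ans, _, _, _, _ => ans
  | fuel+1, ans, rem, live, p, k =>
    if rem = 0 then ans
    else
      let l := (PySem.List.pyGet? live (k - 1)).getD 0
      let r := if k < (live.length : Int) then (PySem.List.pyGet? live k).getD 0
               else (PySem.List.pyGet? live 0).getD 0
      let dl := PySem.Int.mod (p - l) n
      let dr := PySem.Int.mod (r - p) n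
      if dl < dr then
        let k' := PySem.Int.mod (k - 1) (live.length : Int)
        match PySem.List.pop? live k' with
        | some (q, live') =>
            let mq := (PySem.List.pyGet? moves q).getD 0
            altLoop n moves fuel (ans + dl + mq) (rem - mq) live' q k'
        | none => ans
      else
        let k' := if k = (live.length : Int) then 0 else k
        match PySem.List.pop? live k' with
        | some (q, live') =>
            let mq := (PySem.List.pyGet? moves q).getD 0
            altLoop n moves fuel (ans + dr + mq) (rem - mq) live' q k'
        | none => ans

def solution_alt (name : String) : Int :=
  let n : Int := PySem.List.len name.toList
  let moves := name.toList.map (fun ch => min ((ch.toNat : Int) - 65) (90 - (ch.toNat : Int) + 1))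
  let answer := (PySem.List.pyGet? moves 0).getD 0
  let remaining := moves.sum - answer
  let live := (PySem.List.pyRange 1 n 1).filter (fun j => (PySem.List.pyGet? moves j).getD 0 ≠ 0)
  altLoop n moves (moves.length + 1) answer remaining live 0 0

-- ===== PRECONDITION & SPEC =====
-- Pre_ excludes only the empty string, on which both A and B raise IndexError (name[0]).
def Pre_solution (name : String) : Prop := name ≠ ""
instance (name : String) : Decidable (Pre_solution name) := by unfold Pre_solution; infer_instance
def pvWitness_solution : String := "JAZ"

def Spec_solution (name : String) (out : Int) : Prop := out = solution_alt name
instance (name : String) (out : Int) : Decidable (Spec_solution name out) := by unfold Spec_solution; infer_instance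

-- ===== CLAIM (what is proved, stated in full; the proofs are below) =====
def Claim_equal_solution : Prop := ∀ (name : String), Dom_solution name → Pre_solution name → Spec_solution name (solution name)

-- ===== LEMMAS AND PROOFS =====

-- Python negative indexing: xs[i] for -len ≤ i < 0 is xs[len+i]
theorem jget_neg (xs : List Int) (i p : Int) (h1 : i < 0) (h2 : p = (xs.length : Int) + i)
    (h3 : 0 ≤ p) : PySem.List.pyGet? xs i = PySem.List.pyGet? xs p := by
  have hk : i = -(((-i).toNat : Nat) : Int) := by omega
  rw [hk, PySem.List.pyGet?_neg_natCast _ _ (by omega) (by omega),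
    PySem.List.pyGet?_of_nonneg xs h3]
  congr 1
  omega

theorem jget_some (xs : List Int) (q : Int) (h1 : 0 ≤ q) (h2 : q < (xs.length : Int)) :
    ∃ w, PySem.List.pyGet? xs q = some w := by
  rw [PySem.List.pyGet?_of_nonneg xs h1]
  exact ⟨_, List.getElem?_eq_getElem (by omega)⟩

theorem jset_neg (xs : List Int) (v : Int) (k : Nat) (h1 : 0 < k) (h2 : k ≤ xs.length) :
    PySem.List.pySetD xs (-(k : Int)) v = xs.set (xs.length - k) v := by
  have hk2 : -((xs.length : Int)) ≤ -(k : Int) := by omega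
  simp [PySem.List.pySetD, PySem.List.pySet?, PySem.List.pyIdx?, hk2, h1.ne']

theorem jset_eq (xs : List Int) (i p : Int) (hr : -(xs.length : Int) ≤ i)
    (_hlt : i < (xs.length : Int)) (hp : p = if i < 0 then (xs.length : Int) + i else i) :
    PySem.List.pySetD xs i 0 = xs.set p.toNat 0 := by
  by_cases hneg : i < 0
  · have hk : i = -(((-i).toNat : Nat) : Int) := by omega
    rw [hk, jset_neg xs 0 (-i).toNat (by omega) (by omega)]
    congr 1
    simp [hp, hneg]
    omega
  · rw [PySem.List.pySetD_of_nonneg xs 0 (by omega)]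
    congr 1
    simp [hp, hneg]

theorem get_set_self (xs : List Int) (p : Int) (h1 : 0 ≤ p) (h2 : p < (xs.length : Int)) :
    PySem.List.pyGet? (xs.set p.toNat 0) p = some 0 := by
  rw [PySem.List.pyGet?_of_nonneg _ h1]
  exact List.getElem?_set_self (by omega)

theorem get_set_ne (xs : List Int) (p j : Int) (h1 : 0 ≤ j) (hne : j ≠ p) (hp : 0 ≤ p) :
    PySem.List.pyGet? (xs.set p.toNat 0) j = PySem.List.pyGet? xs j := by
  rw [PySem.List.pyGet?_of_nonneg _ h1, PySem.List.pyGet?_of_nonneg _ h1]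
  rw [List.getElem?_set_ne]
  omega

theorem sum_set_zero (l : List Int) (t : Nat) (h : t < l.length) :
    (l.set t 0).sum = l.sum - l[t] := by
  induction l generalizing t with
  | nil => simp at h
  | cons x xs ih =>
    cases t with
    | zero => simp
    | succ j =>
      simp at h
      simp [List.set, ih j (by omega)]
      ring

theorem mod_pos_eq (x n : Int) (h1 : 0 ≤ x) (h2 : x < n) : PySem.Int.mod x n = x := by
  rw [PySem.Int.mod_eq_emod_of_pos (by omega)]
  exact Int.emod_eq_of_lt h1 h2

theorem mod_neg_eq (x n : Int) (h1 : -n ≤ x) (h2 : x < 0) : PySem.Int.mod x n = x + n := by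
  rw [PySem.Int.mod_eq_emod_of_pos (by omega), ← Int.add_emod_right]
  exact Int.emod_eq_of_lt (by omega) (by omega)

theorem pairwise_dropLast (l : List Int) (h : l.Pairwise (· < ·)) :
    l.dropLast.Pairwise (· < ·) :=
  List.Pairwise.sublist (List.dropLast_sublist l) h

theorem mem_dropLast_lt_getLast (l : List Int) (h : l.Pairwise (· < ·)) (hne : l ≠ [])
    (q : Int) (hq : q ∈ l.dropLast) : q < l.getLast hne := by
  have e := List.dropLast_append_getLast hne
  rw [← e] at h
  have := (List.pairwise_append.mp h).2.2
  exact this q hq _ (by simp)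

theorem mem_le_getLast (l : List Int) (h : l.Pairwise (· < ·)) (hne : l ≠ [])
    (q : Int) (hq : q ∈ l) : q ≤ l.getLast hne := by
  rw [← List.dropLast_append_getLast hne] at hq
  rcases List.mem_append.mp hq with h1 | h1
  · exact le_of_lt (mem_dropLast_lt_getLast l h hne q h1)
  · simp at h1
    omega

theorem head_le_mem (x : Int) (rest : List Int) (h : (x :: rest).Pairwise (· < ·))
    (q : Int) (hq : q ∈ x :: rest) : x ≤ q := by
  rcases List.mem_cons.mp hq with h1 | h1
  · omega
  · exact le_of_lt ((List.pairwise_cons.mp h).1 q h1)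

-- the left scan stops exactly at the first nonzero entry
theorem scanL_eq (mm : List Int) (i L : Int) (w : Int)
    (hw : PySem.List.pyGet? mm (i - L) = some w) (hw0 : w ≠ 0) :
    ∀ (fuel : Nat) (l : Int), 1 ≤ l → l ≤ L →
    (∀ d : Int, l ≤ d → d < L → PySem.List.pyGet? mm (i - d) = some 0) →
    (L - l).toNat < fuel →
    solScanL mm i fuel l = some L := by
  intro fuel
  induction fuel with
  | zero => intro l _ _ _ hf; omega
  | succ f ih =>
    intro l hl1 hlL hzero hf
    by_cases heq : l = L
    · subst heq
      simp [solScanL, hw, hw0]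
    · have h0 : PySem.List.pyGet? mm (i - l) = some 0 := hzero l (le_refl _) (by omega)
      simp only [solScanL, h0]
      exact ih (l + 1) (by omega) (by omega) (fun d hd1 hd2 => hzero d (by omega) hd2) (by omega)

theorem scanR_eq (mm : List Int) (i L : Int) (w : Int)
    (hw : PySem.List.pyGet? mm (i + L) = some w) (hw0 : w ≠ 0) :
    ∀ (fuel : Nat) (l : Int), 1 ≤ l → l ≤ L →
    (∀ d : Int, l ≤ d → d < L → PySem.List.pyGet? mm (i + d) = some 0) →
    (L - l).toNat < fuel →
    solScanR mm i fuel l = some L := by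
  intro fuel
  induction fuel with
  | zero => intro l _ _ _ hf; omega
  | succ f ih =>
    intro l hl1 hlL hzero hf
    by_cases heq : l = L
    · subst heq
      simp [solScanR, hw, hw0]
    · have h0 : PySem.List.pyGet? mm (i + l) = some 0 := hzero l (le_refl _) (by omega)
      simp only [solScanR, h0]
      exact ih (l + 1) (by omega) (by omega) (fun d hd1 hd2 => hzero d (by omega) hd2) (by omega)

-- the state correspondence between A's loop and B's loop
def StateRel (moves mm : List Int) (i : Int) (live : List Int) (p k : Int) : Prop :=
  mm.length = moves.length ∧
  0 ≤ p ∧ p < (moves.length : Int) ∧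
  live.Pairwise (· < ·) ∧
  (∀ q ∈ live, 0 ≤ q ∧ q < (moves.length : Int) ∧
    PySem.List.pyGet? mm q = PySem.List.pyGet? moves q ∧
    PySem.List.pyGet? moves q ≠ some 0) ∧
  (∀ j : Int, 0 ≤ j → j < (moves.length : Int) → j ∉ live → j ≠ p →
    PySem.List.pyGet? mm j = some 0) ∧
  PySem.List.pyGet? mm p = PySem.List.pyGet? moves p ∧
  ((0 ≤ i ∧ i = p ∧ k = 0 ∧ ∀ q ∈ live, p < q) ∨
   (i < 0 ∧ p = (moves.length : Int) + i ∧ k = (live.length : Int) ∧ ∀ q ∈ live, q < p))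

theorem loop_eq (moves : List Int) : ∀ (fuel : Nat) (mm live : List Int) (i p k ans v : Int),
    StateRel moves mm i live p k → PySem.List.pyGet? moves p = some v → live.length < fuel →
    solLoop mm i ans fuel =
      altLoop (moves.length : Int) moves fuel (ans + v) (mm.sum - v) live p k := by
  intro fuel
  induction fuel with
  | zero => intro _ _ _ _ _ _ _ _ _ hf; omega
  | succ f ih =>
    intro mm live i p k ans v hrel hv hfuel
    obtain ⟨hlen, hp0, hpN, hsort, hliveF, hzero, hcur, hside⟩ := hrel
    have hN1 : (1 : Int) ≤ (moves.length : Int) := by omega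
    have hiB : -(moves.length : Int) ≤ i ∧ i < (moves.length : Int) := by
      rcases hside with ⟨h0, hip, _, _⟩ | ⟨hneg, hpi, _, _⟩ <;> omega
    have hmi : PySem.List.pyGet? mm i = some v := by
      rcases hside with ⟨h0, hip, _, _⟩ | ⟨hneg, hpi, _, _⟩
      · rw [hip, hcur]; exact hv
      · rw [jget_neg mm i p hneg (by omega) hp0, hcur]; exact hv
    have hset : PySem.List.pySetD mm i 0 = mm.set p.toNat 0 := by
      apply jset_eq mm i p (by omega) (by omega)
      rcases hside with ⟨h0, hip, _, _⟩ | ⟨hneg, hpi, _, _⟩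
      · rw [if_neg (by omega)]; omega
      · rw [if_pos hneg]; omega
    have htlen : p.toNat < mm.length := by omega
    have hvt : mm[p.toNat] = v := by
      have := hcur.trans hv
      rw [PySem.List.pyGet?_of_nonneg mm hp0, List.getElem?_eq_getElem htlen] at this
      exact Option.some.inj this
    have hsum' : (mm.set p.toNat 0).sum = mm.sum - v := by
      rw [sum_set_zero mm p.toNat htlen, hvt]
    have hlen' : (mm.set p.toNat 0).length = moves.length := by simp [hlen]
    -- all non-live positions of the updated array are zero (including p)
    have hzero' : ∀ j : Int, 0 ≤ j → j < (moves.length : Int) → j ∉ live →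
        PySem.List.pyGet? (mm.set p.toNat 0) j = some 0 := by
      intro j h1 h2 h3
      by_cases hjp : j = p
      · subst hjp; exact get_set_self mm j h1 (by omega)
      · rw [get_set_ne mm p j h1 hjp hp0]; exact hzero j h1 h2 h3 hjp
    have hlive' : ∀ q ∈ live, PySem.List.pyGet? (mm.set p.toNat 0) q = PySem.List.pyGet? moves q := by
      intro q hq
      obtain ⟨hq0, hqN, hqm, hqnz⟩ := hliveF q hq
      have hqp : q ≠ p := by
        rcases hside with ⟨_, _, _, hgt⟩ | ⟨_, _, _, hltq⟩
        · have := hgt q hq; omega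
        · have := hltq q hq; omega
      rw [get_set_ne mm p q hq0 hqp hp0]; exact hqm
    -- unfold one step of A
    rw [show solLoop mm i ans (f + 1) =
        (let mm1 := PySem.List.pySetD mm i 0
         if mm1.sum = 0 then ans + v
         else
           match solScanL mm1 i (2 * mm1.length + 2) 1, solScanR mm1 i (2 * mm1.length + 2) 1 with
           | some l, some r =>
             if l < r then solLoop mm1 (i - l) (ans + v + l) f
             else solLoop mm1 (i + r) (ans + v + r) f
           | _, _ => ans + v) from by simp only [solLoop, hmi, Option.getD_some]]
    simp only [hset]
    by_cases hs : (mm.set p.toNat 0).sum = 0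
    · rw [if_pos hs]
      rw [show altLoop (moves.length : Int) moves (f + 1) (ans + v) (mm.sum - v) live p k
          = ans + v from by
        have h0 : mm.sum - v = 0 := by omega
        simp [altLoop, h0]]
    · rw [if_neg hs]
      have hrem : mm.sum - v ≠ 0 := by omega
      -- live is nonempty
      have hlive_ne : live ≠ [] := by
        intro hnil
        apply hs
        apply List.sum_eq_zero
        intro x hx
        obtain ⟨j, hj, hxj⟩ := List.mem_iff_getElem.mp hx
        have := hzero' (j : Int) (by omega) (by simp at hj; omega) (by simp [hnil])
        rw [PySem.List.pyGet?_of_nonneg _ (by omega)] at this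
        simp at this
        rw [← hxj]
        simpa [List.getElem?_eq_getElem hj] using this
      obtain ⟨m1, rest, hlc⟩ := List.exists_cons_of_ne_nil hlive_ne
      set m2 := live.getLast hlive_ne with hm2def
      have hm2mem : m2 ∈ live := List.getLast_mem hlive_ne
      have hm1mem : m1 ∈ live := by rw [hlc]; exact List.mem_cons_self
      have hm1le : ∀ q ∈ live, m1 ≤ q := by
        intro q hq; rw [hlc] at hq hsort; exact head_le_mem m1 rest hsort q hq
      have hm2ge : ∀ q ∈ live, q ≤ m2 := mem_le_getLast live hsort hlive_ne
      obtain ⟨hm10, hm1N, hm1m, hm1nz⟩ := hliveF m1 hm1mem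
      obtain ⟨hm20, hm2N, hm2m, hm2nz⟩ := hliveF m2 hm2mem
      obtain ⟨w1, hw1⟩ := jget_some moves m1 hm10 hm1N
      obtain ⟨w2, hw2⟩ := jget_some moves m2 hm20 hm2N
      have hw1nz : w1 ≠ 0 := fun h => hm1nz (by rw [hw1, h])
      have hw2nz : w2 ≠ 0 := fun h => hm2nz (by rw [hw2, h])
      have hw1' : PySem.List.pyGet? (mm.set p.toNat 0) m1 = some w1 := by
        rw [hlive' m1 hm1mem]; exact hw1
      have hw2' : PySem.List.pyGet? (mm.set p.toNat 0) m2 = some w2 := by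
        rw [hlive' m2 hm2mem]; exact hw2
      have hlenlive : 1 ≤ live.length := by rw [hlc]; simp
      -- the values B computes, and the scan results of A, in both cursor-side cases
      have hDL : ∃ DL DR : Int,
          PySem.Int.mod (p - ((PySem.List.pyGet? live (k - 1)).getD 0)) (moves.length : Int) = DL ∧
          PySem.Int.mod (((if k < (live.length : Int) then (PySem.List.pyGet? live k).getD 0
              else (PySem.List.pyGet? live 0).getD 0)) - p) (moves.length : Int) = DR ∧
          solScanL (mm.set p.toNat 0) i (2 * (mm.set p.toNat 0).length + 2) 1 = some DL ∧
          solScanR (mm.set p.toNat 0) i (2 * (mm.set p.toNat 0).length + 2) 1 = some DR ∧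
          i - DL = m2 - (moves.length : Int) ∧ i + DR = m1 := by
        have hmmlen : ((mm.set p.toNat 0).length : Int) = (moves.length : Int) := by
          simp [hlen]
        have hfuelScan : ∀ L : Int, L ≤ 2 * (moves.length : Int) →
            (L - 1).toNat < 2 * (mm.set p.toNat 0).length + 2 := by
          intro L hL
          omega
        rcases hside with ⟨hi0, hip, hk0, hgt⟩ | ⟨hineg, hpi, hklen, hltp⟩
        · -- cursor at a nonnegative python index: all pending indices lie to its right
          have hm2p : p < m2 := hgt m2 hm2mem
          have hm1p : p < m1 := hgt m1 hm1mem
          have hl : (PySem.List.pyGet? live (k - 1)).getD 0 = m2 := by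
            rw [hk0, show (0 : Int) - 1 = -1 by norm_num, PySem.List.pyGet?_neg_one,
              List.getLast?_eq_some_getLast hlive_ne, ← hm2def, Option.getD_some]
          have hr : (if k < ((live.length : Nat) : Int) then (PySem.List.pyGet? live k).getD 0
              else (PySem.List.pyGet? live 0).getD 0) = m1 := by
            rw [if_pos (by omega), hk0, hlc, PySem.List.pyGet?_zero_cons, Option.getD_some]
          refine ⟨p + (moves.length : Int) - m2, m1 - p, ?_, ?_, ?_, ?_, by omega, by omega⟩
          · rw [hl, mod_neg_eq _ _ (by omega) (by omega)]
            ring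
          · rw [hr, mod_pos_eq _ _ (by omega) (by omega)]
          · apply scanL_eq (mm.set p.toNat 0) i _ w2 _ hw2nz _ 1 (le_refl 1) (by omega) _
              (hfuelScan _ (by omega))
            · rw [show i - (p + (moves.length : Int) - m2) = m2 - (moves.length : Int) by omega,
                jget_neg _ _ m2 (by omega) (by omega) hm20]
              exact hw2'
            · intro d hd1 hd2
              by_cases hdp : d ≤ p
              · rw [hip]
                apply hzero' (p - d) (by omega) (by omega)
                intro hin
                have := hgt _ hin
                omega
              · rw [jget_neg _ _ ((moves.length : Int) + p - d) (by omega) (by omega) (by omega)]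
                apply hzero' _ (by omega) (by omega)
                intro hin
                have := hm2ge _ hin
                omega
          · apply scanR_eq (mm.set p.toNat 0) i _ w1 _ hw1nz _ 1 (le_refl 1) (by omega) _
              (hfuelScan _ (by omega))
            · rw [show i + (m1 - p) = m1 by omega]
              exact hw1'
            · intro d hd1 hd2
              rw [hip]
              apply hzero' (p + d) (by omega) (by omega)
              intro hin
              have := hm1le _ hin
              omega
        · -- cursor at a negative python index: all pending indices lie to its left
          have hm2p : m2 < p := hltp m2 hm2mem
          have hm1p : m1 < p := hltp m1 hm1mem
          have hl : (PySem.List.pyGet? live (k - 1)).getD 0 = m2 := by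
            rw [hklen, show ((live.length : Nat) : Int) - 1 = ((live.length - 1 : Nat) : Int)
              by omega, PySem.List.pyGet?_natCast,
              List.getElem?_eq_getElem (by omega : live.length - 1 < live.length),
              Option.getD_some, hm2def, List.getLast_eq_getElem]
          have hr : (if k < ((live.length : Nat) : Int) then (PySem.List.pyGet? live k).getD 0
              else (PySem.List.pyGet? live 0).getD 0) = m1 := by
            rw [if_neg (by omega), hlc, PySem.List.pyGet?_zero_cons, Option.getD_some]
          refine ⟨p - m2, m1 - p + (moves.length : Int), ?_, ?_, ?_, ?_, by omega, by omega⟩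
          · rw [hl, mod_pos_eq _ _ (by omega) (by omega)]
          · rw [hr, mod_neg_eq _ _ (by omega) (by omega)]
          · apply scanL_eq (mm.set p.toNat 0) i _ w2 _ hw2nz _ 1 (le_refl 1) (by omega) _
              (hfuelScan _ (by omega))
            · rw [show i - (p - m2) = m2 - (moves.length : Int) by omega,
                jget_neg _ _ m2 (by omega) (by omega) hm20]
              exact hw2'
            · intro d hd1 hd2
              rw [jget_neg _ _ (p - d) (by omega) (by omega) (by omega)]
              apply hzero' _ (by omega) (by omega)
              intro hin
              have := hm2ge _ hin
              omega
          · apply scanR_eq (mm.set p.toNat 0) i _ w1 _ hw1nz _ 1 (le_refl 1) (by omega) _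
              (hfuelScan _ (by omega))
            · rw [show i + (m1 - p + (moves.length : Int)) = m1 by omega]
              exact hw1'
            · intro d hd1 hd2
              by_cases hdn : d < (moves.length : Int) - p
              · rw [jget_neg _ _ (p + d) (by omega) (by omega) (by omega)]
                apply hzero' _ (by omega) (by omega)
                intro hin
                have := hltp _ hin
                omega
              · rw [show i + d = p - (moves.length : Int) + d by omega]
                apply hzero' _ (by omega) (by omega)
                intro hin
                have := hm1le _ hin
                omega
      obtain ⟨DL, DR, hdl, hdr, hscanL, hscanR, hiL, hiR⟩ := hDL
      -- the gap index B moves to, on each side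
      have hkL : PySem.Int.mod (k - 1) ((live.length : Nat) : Int) = ((live.length - 1 : Nat) : Int) := by
        rcases hside with ⟨_, _, hk0, _⟩ | ⟨_, _, hklen, _⟩
        · subst hk0
          rw [mod_neg_eq _ _ (by omega) (by omega)]
          omega
        · rw [hklen, mod_pos_eq _ _ (by omega) (by omega)]
          omega
      have hkR : (if k = ((live.length : Nat) : Int) then (0 : Int) else k) = 0 := by
        rcases hside with ⟨_, _, hk0, _⟩ | ⟨_, _, hklen, _⟩
        · subst hk0; simp
        · rw [if_pos hklen]
      -- B's pops
      have hpopL : PySem.List.pop? live ((live.length - 1 : Nat) : Int) =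
          some (m2, live.dropLast) := by
        rw [PySem.List.pop?_natCast live (live.length - 1) (by omega)]
        rw [List.eraseIdx_length_sub_one]
        congr 2
        rw [hm2def, List.getLast_eq_getElem]
      have hpopR : PySem.List.pop? live 0 = some (m1, rest) := by
        rw [hlc]; exact PySem.List.pop?_zero_cons m1 rest
      -- unfold one step of B
      rw [show altLoop (moves.length : Int) moves (f + 1) (ans + v) (mm.sum - v) live p k
          = (if DL < DR then
              altLoop (moves.length : Int) moves f (ans + v + DL + w2) (mm.sum - v - w2)
                live.dropLast m2 ((live.length - 1 : Nat) : Int)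
             else
              altLoop (moves.length : Int) moves f (ans + v + DR + w1) (mm.sum - v - w1)
                rest m1 0) from by
        simp only [altLoop, if_neg hrem, hdl, hdr, hkL, hkR, hpopL, hpopR, hw1, hw2,
          Option.getD_some]]
      simp only [hscanL, hscanR]
      by_cases hcmp : DL < DR
      · rw [if_pos hcmp, if_pos hcmp, hiL]
        have hrel2 : StateRel moves (mm.set p.toNat 0) (m2 - (moves.length : Int))
            live.dropLast m2 ((live.length - 1 : Nat) : Int) := by
          refine ⟨by simp [hlen], hm20, hm2N, pairwise_dropLast live hsort, ?_, ?_,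
            hlive' m2 hm2mem, Or.inr ⟨by omega, by omega, ?_, ?_⟩⟩
          · intro q hq
            have hqlive : q ∈ live := List.mem_of_mem_dropLast hq
            obtain ⟨a, b, _, d⟩ := hliveF q hqlive
            exact ⟨a, b, hlive' q hqlive, d⟩
          · intro j h1 h2 h3 h4
            apply hzero' j h1 h2
            intro hjl
            rw [← List.dropLast_append_getLast hlive_ne] at hjl
            rcases List.mem_append.mp hjl with h | h
            · exact h3 h
            · simp at h
              exact h4 (by rw [h, hm2def])
          · simp [List.length_dropLast]
          · exact fun q hq => mem_dropLast_lt_getLast live hsort hlive_ne q hq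
        have hrec := ih (mm.set p.toNat 0) live.dropLast (m2 - (moves.length : Int)) m2
          ((live.length - 1 : Nat) : Int) (ans + v + DL) w2 hrel2 hw2
          (by simp [List.length_dropLast]; omega)
        rw [hrec, hsum']
      · rw [if_neg hcmp, if_neg hcmp, hiR]
        have hrel2 : StateRel moves (mm.set p.toNat 0) m1 rest m1 0 := by
          refine ⟨by simp [hlen], hm10, hm1N, ?_, ?_, ?_, hlive' m1 hm1mem,
            Or.inl ⟨hm10, rfl, rfl, ?_⟩⟩
          · have := hsort
            rw [hlc] at this
            exact (List.pairwise_cons.mp this).2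
          · intro q hq
            have hqlive : q ∈ live := by rw [hlc]; exact List.mem_cons_of_mem m1 hq
            obtain ⟨a, b, _, d⟩ := hliveF q hqlive
            exact ⟨a, b, hlive' q hqlive, d⟩
          · intro j h1 h2 h3 h4
            apply hzero' j h1 h2
            rw [hlc]
            intro hjl
            rcases List.mem_cons.mp hjl with h | h
            · exact h4 h
            · exact h3 h
          · have := hsort
            rw [hlc] at this
            exact (List.pairwise_cons.mp this).1
        have hrec := ih (mm.set p.toNat 0) rest m1 m1 0 (ans + v + DR) w1 hrel2 hw1
          (by have : live.length = rest.length + 1 := by rw [hlc]; simp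
              omega)
        rw [hrec, hsum']

theorem solution_eq_alt (name : String) (h : name ≠ "") : solution name = solution_alt name := by
  have hcs : name.toList ≠ [] := by
    intro hnil
    exact h (String.toList_eq_nil_iff.mp hnil)
  simp only [solution, solution_alt]
  set moves := name.toList.map
    (fun ch => min ((ch.toNat : Int) - 65) (90 - (ch.toNat : Int) + 1)) with hmoves
  have hlen1 : 1 ≤ moves.length := by
    rw [hmoves, List.length_map]
    exact List.length_pos_of_ne_nil hcs
  have hN : PySem.List.len name.toList = (moves.length : Int) := by
    simp [PySem.List.len_eq, hmoves]
  obtain ⟨v, hv⟩ := jget_some moves 0 (le_refl 0) (by omega)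
  set live0 := (PySem.List.pyRange 1 (PySem.List.len name.toList) 1).filter
    (fun j => (PySem.List.pyGet? moves j).getD 0 ≠ 0) with hlive0
  have hmemlive : ∀ q : Int, q ∈ live0 ↔
      (1 ≤ q ∧ q < (moves.length : Int) ∧ (PySem.List.pyGet? moves q).getD 0 ≠ 0) := by
    intro q
    rw [hlive0, List.mem_filter]
    rw [hN]
    simp [PySem.List.mem_pyRange_one]
    tauto
  have hrel : StateRel moves moves 0 live0 0 0 := by
    refine ⟨rfl, le_refl 0, by omega, ?_, ?_, ?_, rfl, Or.inl ⟨le_refl 0, rfl, rfl, ?_⟩⟩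
    · rw [hlive0]
      exact List.Pairwise.filter _ (PySem.List.pairwise_lt_pyRange_one _ _)
    · intro q hq
      obtain ⟨h1, h2, h3⟩ := (hmemlive q).mp hq
      obtain ⟨w, hw⟩ := jget_some moves q (by omega) h2
      refine ⟨by omega, h2, rfl, ?_⟩
      rw [hw]
      intro hcontra
      apply h3
      rw [hw]
      simpa using hcontra
    · intro j h1 h2 h3 h4
      obtain ⟨w, hw⟩ := jget_some moves j h1 h2
      have : ¬ (1 ≤ j ∧ j < (moves.length : Int) ∧ (PySem.List.pyGet? moves j).getD 0 ≠ 0) :=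
        fun hc => h3 ((hmemlive j).mpr hc)
      rw [hw]
      have hj1 : 1 ≤ j := by omega
      have hw0 : w = 0 := by
        by_contra hwz
        exact this ⟨hj1, h2, by rw [hw]; simpa using hwz⟩
      rw [hw0]
    · intro q hq
      have := (hmemlive q).mp hq
      omega
  have hfuel : live0.length < moves.length + 1 := by
    have h1 : live0.length ≤ (PySem.List.pyRange 1 (PySem.List.len name.toList) 1).length := by
      rw [hlive0]
      exact List.length_filter_le _ _
    rw [hN, PySem.List.length_pyRange_one] at h1
    omega
  have hle := loop_eq moves (moves.length + 1) moves live0 0 0 0 0 v hrel hv hfuel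
  rw [hN, hv, Option.getD_some, hle, zero_add]

-- ===== VERDICT (by name: the statement is the Claim_ definition above) =====
theorem solution_spec : Claim_equal_solution := by
  intro name _ hpre
  unfold Spec_solution
  exact solution_eq_alt name hpre
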